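-- pv_equiv track=rewrite | github.com/roby-avo/alpaca | src/build_elasticsearch_index.py | _flatten_aliases
-- ===== SOURCE A (Python) =====
-- from collections.abc import Iterator, Mapping, Sequence
--
-- def _flatten_aliases(aliases_by_lang: Mapping[str, Sequence[str]]) -> list[str]:
--     flattened: list[str] = []
--     seen: set[str] = set()
--     if "en" in aliases_by_lang:
--         ordered_langs = ["en", *sorted(lang for lang in aliases_by_lang if lang != "en")]
--     else:
--         ordered_langs = sorted(aliases_by_lang)
--     for language in ordered_langs:
--         values = aliases_by_lang.get(language, [])
--         for alias in values:
--             if not isinstance(alias, str):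
--                 continue
--             candidate = alias.strip()
--             if not candidate or candidate in seen:
--                 continue
--             seen.add(candidate)
--             flattened.append(candidate)
--     return flattened
-- ===== SOURCE B (Python) =====
-- def _flatten_aliases(aliases_by_lang):
--     langs = sorted(aliases_by_lang, key=lambda lang: (lang != "en", lang))
--     worklist = [c for lang in langs for alias in aliases_by_lang[lang]
--                 if isinstance(alias, str) and (c := alias.strip())]
--     result = []
--     while worklist:
--         head = worklist[0]
--         result.append(head)
--         worklist = [x for x in worklist[1:] if x != head]
--     return result
-- ===== Notes on version B (the rewrite author's own statement) =====
-- stated objective: alternative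
-- what changed: A builds the language order by special-casing 'en' (prepend + filter + sort) and dedups in one pass with an auxiliary seen-set; B orders the languages with a single composite-key sort (lang != 'en', lang), collects all stripped non-empty candidates into a flat worklist, and dedups with no auxiliary structure by repeatedly taking the head and filtering its duplicates out of the remaining worklist.
import Mathlib
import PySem

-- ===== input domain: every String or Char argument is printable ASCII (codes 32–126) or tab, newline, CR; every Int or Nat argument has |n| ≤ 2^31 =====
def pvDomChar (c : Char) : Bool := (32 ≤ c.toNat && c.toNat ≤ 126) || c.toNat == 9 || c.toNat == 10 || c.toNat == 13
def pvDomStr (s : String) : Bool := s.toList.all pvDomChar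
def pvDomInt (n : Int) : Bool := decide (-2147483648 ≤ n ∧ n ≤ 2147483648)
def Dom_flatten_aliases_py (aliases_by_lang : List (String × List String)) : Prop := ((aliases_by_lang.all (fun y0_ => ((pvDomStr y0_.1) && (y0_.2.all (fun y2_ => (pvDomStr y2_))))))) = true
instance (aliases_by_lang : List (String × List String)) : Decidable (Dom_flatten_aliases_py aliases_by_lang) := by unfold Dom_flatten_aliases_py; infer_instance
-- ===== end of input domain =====

-- B replaces A's en-special-cased ordering (prepend + filter + sort) with one composite-key
-- sort, and A's seen-set dedup with a worklist filtered head by head; same return value.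

-- ===== PORT A =====
def flatten_aliases_py (aliases_by_lang : List (String × List String)) : List String :=
  let keys := aliases_by_lang.map Prod.fst
  let ordered_langs :=
    if "en" ∈ keys then
      "en" :: PySem.List.sorted (keys.filter (fun l => l != "en")) (fun x => x) false
    else
      PySem.List.sorted keys (fun x => x) false
  (ordered_langs.foldl (fun (st : List String × PySem.Set String) language =>
      let values := (PySem.Dict.mk aliases_by_lang).getD language []
      values.foldl (fun st al =>
          let candidate := PySem.Str.strip al
          if candidate = "" ∨ st.2.contains candidate then st
          else (st.1 ++ [candidate], st.2.add candidate)) st)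
    ([], PySem.Set.empty)).1

-- ===== PORT B =====
-- the while loop of Source B: append the head, filter its duplicates out of the rest, continue
def pvNubLoop : List String → List String
  | [] => []
  | head :: rest => head :: pvNubLoop (rest.filter (fun x => x != head))
termination_by l => l.length
decreasing_by
  simpa using Nat.lt_succ_of_le (List.length_filter_le _ _)

def flatten_aliases_py_alt (aliases_by_lang : List (String × List String)) : List String :=
  let langs := PySem.List.sorted2 (aliases_by_lang.map Prod.fst)
      (fun lang => lang != "en") (fun lang => lang) false
  let worklist := langs.flatMap (fun lang =>
      -- aliases_by_lang[lang]: lang is drawn from the dict's keys, so KeyError (none) is unreachable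
      (match (PySem.Dict.mk aliases_by_lang).get? lang with
       | some vs => vs
       | none => []).filterMap (fun al =>
        let c := PySem.Str.strip al
        if c = "" then none else some c))
  pvNubLoop worklist

-- ===== PRECONDITION & SPEC =====
-- The association list stands for a Python dict, whose keys are distinct; on duplicate-key
-- lists (not producible from any dict) the two ports' language orderings are artefacts.
def Pre_flatten_aliases_py (aliases_by_lang : List (String × List String)) : Prop :=
  (aliases_by_lang.map Prod.fst).Nodup
instance (aliases_by_lang : List (String × List String)) : Decidable (Pre_flatten_aliases_py aliases_by_lang) := by unfold Pre_flatten_aliases_py; infer_instance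

def pvWitness_flatten_aliases_py : (List (String × List String)) :=
  [("en", ["hello", " hello "]), ("de", ["hallo", ""])]

def Spec_flatten_aliases_py (aliases_by_lang : List (String × List String)) (out : List String) : Prop := out = flatten_aliases_py_alt aliases_by_lang
instance (aliases_by_lang : List (String × List String)) (out : List String) : Decidable (Spec_flatten_aliases_py aliases_by_lang out) := by unfold Spec_flatten_aliases_py; infer_instance

-- ===== CLAIM =====
def Claim_equal_flatten_aliases_py : Prop := ∀ (aliases_by_lang : List (String × List String)), Dom_flatten_aliases_py aliases_by_lang → Pre_flatten_aliases_py aliases_by_lang → Spec_flatten_aliases_py aliases_by_lang (flatten_aliases_py aliases_by_lang)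

-- ===== LEMMAS AND PROOFS =====

-- A's inner loop step over one raw alias, and the pure dedup step on a non-empty candidate
def pvAStep (st : List String × PySem.Set String) (al : String) : List String × PySem.Set String :=
  let candidate := PySem.Str.strip al
  if candidate = "" ∨ st.2.contains candidate then st
  else (st.1 ++ [candidate], st.2.add candidate)

def pvDStep (st : List String × PySem.Set String) (c : String) : List String × PySem.Set String :=
  if st.2.contains c then st else (st.1 ++ [c], st.2.add c)

def pvF (al : String) : Option String :=
  let c := PySem.Str.strip al
  if c = "" then none else some c

lemma pvInner (values : List String) (st : List String × PySem.Set String) :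
    values.foldl pvAStep st = (values.filterMap pvF).foldl pvDStep st := by
  induction values generalizing st with
  | nil => rfl
  | cons a t ih =>
      simp only [List.foldl_cons, List.filterMap_cons]
      by_cases h : PySem.Str.strip a = ""
      · simp only [pvF, if_pos h]
        rw [ih]
        congr 1
        simp [pvAStep, h]
      · simp only [pvF, if_neg h, List.foldl_cons]
        rw [ih]
        congr 1
        simp [pvAStep, pvDStep, h]

lemma pvOuter (langs : List String) (vals : String → List String)
    (st : List String × PySem.Set String) :
    langs.foldl (fun st l => (vals l).foldl pvAStep st) st
      = (langs.flatMap (fun l => (vals l).filterMap pvF)).foldl pvDStep st := by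
  induction langs generalizing st with
  | nil => rfl
  | cons l t ih =>
      simp only [List.foldl_cons, List.flatMap_cons, List.foldl_append]
      rw [ih, pvInner]

lemma pvDedupFold (cands : List String) (s : PySem.Set String) :
    cands.foldl pvDStep (s, s) = (cands.foldl PySem.Set.add s, cands.foldl PySem.Set.add s) := by
  induction cands generalizing s with
  | nil => rfl
  | cons c t ih =>
      simp only [List.foldl_cons]
      have hstep : pvDStep (s, s) c = (PySem.Set.add s c, PySem.Set.add s c) := by
        simp only [pvDStep, PySem.Set.add]
        by_cases h : c ∈ s <;> simp [h]
      rw [hstep, ih]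

-- A's seen-set fold produces the ordered dedup of the candidate list
lemma pvAFold_eq_dedup (cands : List String) :
    (cands.foldl pvDStep ([], PySem.Set.empty)).1 = PySem.List.dedup cands := by
  rw [show (([], PySem.Set.empty) : List String × PySem.Set String)
        = ((PySem.Set.empty : PySem.Set String), (PySem.Set.empty : PySem.Set String)) from rfl,
     pvDedupFold, PySem.List.dedup_eq_ofList, PySem.Set.ofList_eq_foldl]
  rfl

-- set(xs) commutes with filtering
lemma pvFilter_ofList (p : String → Bool) (xs : List String) :
    PySem.Set.ofList (xs.filter p) = (PySem.Set.ofList xs).filter p := by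
  induction xs with
  | nil => rfl
  | cons x t ih =>
      by_cases hp : p x
      · simp only [List.filter_cons, hp, if_pos, PySem.Set.ofList_cons, ih,
          PySem.Set.discard, List.filter_filter]
        congr 1
        apply List.filter_congr
        intro a _
        by_cases hax : a = x <;> simp [hax, hp, Bool.and_comm]
      · simp only [List.filter_cons, hp, if_neg, Bool.false_eq_true, not_false_eq_true,
          PySem.Set.ofList_cons, ih, PySem.Set.discard, List.filter_filter]
        apply List.filter_congr
        intro a _
        by_cases hax : a = x <;> simp [hax, hp]

-- B's head-and-filter worklist loop computes the same ordered dedup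
lemma pvNubLoop_eq_dedup (l : List String) : pvNubLoop l = PySem.List.dedup l := by
  have key : ∀ (n : Nat) (l : List String), l.length ≤ n → pvNubLoop l = PySem.List.dedup l := by
    intro n
    induction n with
    | zero =>
        intro l hl
        rw [List.length_eq_zero_iff.mp (Nat.le_zero.mp hl)]
        simp only [pvNubLoop, PySem.List.dedup_eq_ofList, PySem.Set.ofList_nil]

    | succ n ihn =>
        intro l hl
        match l with
        | [] =>
            simp only [pvNubLoop, PySem.List.dedup_eq_ofList, PySem.Set.ofList_nil]
        | head :: rest =>
            rw [pvNubLoop,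
                ihn _ (le_trans (List.length_filter_le _ _) (Nat.le_of_succ_le_succ hl))]
            simp only [PySem.List.dedup_eq_ofList, pvFilter_ofList, PySem.Set.ofList_cons,
              PySem.Set.discard]
            congr 1
  exact key l.length l le_rfl

-- the composite-key sort is the sort by the lexicographic Bool × String key
lemma pvSorted2_eq_sorted_lex (xs : List String) :
    PySem.List.sorted2 xs (fun lang => lang != "en") (fun lang => lang) false
      = PySem.List.sorted xs (fun lang => toLex ((lang != "en"), lang)) false := by
  rw [PySem.List.sorted_eq_foldl_insertBy]
  show List.foldl (fun acc x => PySem.List.insertBy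
      (fun a b : String => decide ((a != "en") < (b != "en")) ||
        !decide ((b != "en") < (a != "en")) && decide (a < b)) x acc) [] xs = _
  have hb : (fun a b : String => decide ((a != "en") < (b != "en")) ||
        !decide ((b != "en") < (a != "en")) && decide (a < b))
      = (fun a b : String =>
          decide (toLex ((a != "en"), a) < toLex ((b != "en"), b))) := by
    funext a b
    rcases lt_trichotomy (a != "en") (b != "en") with h|h|h
    · simp [Prod.Lex.lt_iff, h]
    · simp [Prod.Lex.lt_iff, h]
    · simp [Prod.Lex.lt_iff, h, not_lt_of_gt h, ne_of_gt h]
  rw [hb]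

-- sorting by the lexicographic key = A's en-first construction, for distinct keys
lemma pvOrdering (keys : List String) (hnd : keys.Nodup) :
    PySem.List.sorted keys (fun lang => toLex ((lang != "en"), lang)) false
      = (if "en" ∈ keys then
          "en" :: PySem.List.sorted (keys.filter (fun l => l != "en")) (fun x => x) false
        else PySem.List.sorted keys (fun x => x) false) := by
  by_cases hm : "en" ∈ keys
  · rw [if_pos hm]
    apply PySem.List.sorted_eq_of_perm_of_pairwise_lt
    · refine List.Perm.trans
        (List.Perm.cons _ (PySem.List.sorted_perm (keys.filter (fun l => l != "en")) _ false)) ?_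
      rw [← hnd.erase_eq_filter "en"]
      exact (List.perm_cons_erase hm).symm
    · refine List.pairwise_cons.mpr ⟨?_, ?_⟩
      · intro b hbmem
        have hb : b != "en" := by
          have := List.of_mem_filter (((PySem.List.mem_sorted _ _ _ _).mp hbmem))
          exact this
        simp [Prod.Lex.lt_iff, hb]
      · have hple : (PySem.List.sorted (keys.filter (fun l => l != "en")) (fun x => x) false).Pairwise
            (fun a b => a ≤ b) := PySem.List.sorted_pairwise _ _
        have hndf : (PySem.List.sorted (keys.filter (fun l => l != "en")) (fun x => x) false).Nodup :=
          ((PySem.List.sorted_perm _ _ _).nodup_iff).mpr (hnd.filter _)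
        refine (hple.and hndf).imp_of_mem ?_
        intro a b ha hb ⟨hle, hne⟩
        have ha' : a != "en" := (List.mem_filter.mp ((PySem.List.mem_sorted _ _ _ a).mp ha)).2
        have hb' : b != "en" := (List.mem_filter.mp ((PySem.List.mem_sorted _ _ _ b).mp hb)).2
        have : a < b := lt_of_le_of_ne hle hne
        simp [Prod.Lex.lt_iff, ha', hb', this]
  · rw [if_neg hm]
    apply PySem.List.sorted_eq_of_perm_of_pairwise_lt
    · exact PySem.List.sorted_perm _ _ _
    · have hple : (PySem.List.sorted keys (fun x => x) false).Pairwise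
          (fun a b => a ≤ b) := PySem.List.sorted_pairwise _ _
      have hndf : (PySem.List.sorted keys (fun x => x) false).Nodup :=
        ((PySem.List.sorted_perm _ _ _).nodup_iff).mpr hnd
      refine (hple.and hndf).imp_of_mem ?_
      intro a b ha hb ⟨hle, hne⟩
      have ha' : (a != "en") = true := by
        have hmem := (PySem.List.mem_sorted _ _ _ a).mp ha
        rw [bne_iff_ne]
        intro h
        exact hm (h ▸ hmem)
      have hb' : (b != "en") = true := by
        have hmem := (PySem.List.mem_sorted _ _ _ b).mp hb
        rw [bne_iff_ne]
        intro h
        exact hm (h ▸ hmem)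
      have : a < b := lt_of_le_of_ne hle hne
      simp [Prod.Lex.lt_iff, ha', hb', this]

-- ===== VERDICT =====
theorem flatten_aliases_py_spec : Claim_equal_flatten_aliases_py := by
  intro d _ hpre
  show flatten_aliases_py d = flatten_aliases_py_alt d
  have hvals : ∀ lang, (match (PySem.Dict.mk d).get? lang with
      | some vs => vs | none => []) = (PySem.Dict.mk d).getD lang [] := by
    intro lang
    rw [PySem.Dict.getD_eq_get?_getD]
    cases (PySem.Dict.mk d).get? lang <;> rfl
  have ha : flatten_aliases_py d
      = ((if "en" ∈ d.map Prod.fst then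
            "en" :: PySem.List.sorted ((d.map Prod.fst).filter (fun l => l != "en")) (fun x => x) false
          else PySem.List.sorted (d.map Prod.fst) (fun x => x) false).foldl
          (fun st l => ((PySem.Dict.mk d).getD l []).foldl pvAStep st)
          ([], PySem.Set.empty)).1 := rfl
  have hb : flatten_aliases_py_alt d
      = pvNubLoop ((PySem.List.sorted2 (d.map Prod.fst)
            (fun lang => lang != "en") (fun lang => lang) false).flatMap
          (fun l => (match (PySem.Dict.mk d).get? l with
              | some vs => vs | none => []).filterMap pvF)) := rfl
  rw [ha, hb, pvOuter, pvAFold_eq_dedup, pvNubLoop_eq_dedup,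
      pvSorted2_eq_sorted_lex, pvOrdering _ hpre]
  simp only [hvals]
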